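-- pv_equiv track=rewrite | github.com/ReinderVosDeWael/sergey | sergey/rules/docs.py | _raises_section_content
-- ===== SOURCE A (Python) =====
-- def _raises_section_content(docstring: str) -> str | None:
--     """Return the text of the Raises section, or None if absent.
--
--     Recognises Google style (``Raises:``) and NumPy style
--     (``Raises`` followed by a line of dashes).  Returns None when no
--     Raises section is present so callers can distinguish "absent" from
--     "present but empty".
--     """
--     lines = docstring.splitlines()
--     content: list[str] = []
--     in_raises = False
--     skip_next = False
--     raises_indent = 0
--
--     for idx, line in enumerate(lines):
--         if skip_next:
--             skip_next = False
--             continue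
--         stripped = line.strip()
--         indent = len(line) - len(line.lstrip())
--
--         if not in_raises:
--             if stripped == "Raises:":
--                 in_raises = True
--                 raises_indent = indent
--             elif stripped == "Raises" and idx + 1 < len(lines):
--                 nxt = lines[idx + 1].strip()
--                 if nxt and all(char == "-" for char in nxt):
--                     in_raises = True
--                     raises_indent = indent
--                     skip_next = True
--         else:
--             if stripped and indent <= raises_indent:
--                 nxt = lines[idx + 1].strip() if idx + 1 < len(lines) else ""
--                 if stripped.endswith(":") or (nxt and all(char == "-" for char in nxt)):
--                     break
--             content.append(stripped)
--
--     return "\n".join(content) if in_raises else None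
-- ===== SOURCE B (Python) =====
-- def _raises_section_content(docstring: str) -> str | None:
--     # Index-based: precompute per-line arrays, filter index ranges for the header
--     # and the next section boundary, then slice -- no stateful scan with flags.
--     lines = docstring.splitlines()
--     stripped = [line.strip() for line in lines]
--     indents = [len(line) - len(line.lstrip()) for line in lines]
--     n = len(lines)
--     dashed = [bool(s) and s == "-" * len(s) for s in stripped]
--     headers = [i for i in range(n)
--                if stripped[i] == "Raises:"
--                or (stripped[i] == "Raises" and i + 1 < n and dashed[i + 1])]
--     if not headers:
--         return None
--     h = headers[0]
--     start = h + 1 if stripped[h] == "Raises:" else h + 2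
--     hind = indents[h]
--     stops = [j for j in range(start, n)
--              if stripped[j] and indents[j] <= hind
--              and (stripped[j].endswith(":") or (j + 1 < n and dashed[j + 1]))]
--     end = stops[0] if stops else n
--     return "\n".join(stripped[start:end])
-- ===== Notes on version B (the rewrite author's own statement) =====
-- stated objective: alternative
-- what changed: Replaced A's single stateful scan (in_raises/skip_next/raises_indent flags, break) by an index-based formulation: precompute stripped/indent/dashed arrays once, obtain the header index and the next-section boundary index by filtering index ranges, and return the slice stripped[start:end] joined.
import Mathlib
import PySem

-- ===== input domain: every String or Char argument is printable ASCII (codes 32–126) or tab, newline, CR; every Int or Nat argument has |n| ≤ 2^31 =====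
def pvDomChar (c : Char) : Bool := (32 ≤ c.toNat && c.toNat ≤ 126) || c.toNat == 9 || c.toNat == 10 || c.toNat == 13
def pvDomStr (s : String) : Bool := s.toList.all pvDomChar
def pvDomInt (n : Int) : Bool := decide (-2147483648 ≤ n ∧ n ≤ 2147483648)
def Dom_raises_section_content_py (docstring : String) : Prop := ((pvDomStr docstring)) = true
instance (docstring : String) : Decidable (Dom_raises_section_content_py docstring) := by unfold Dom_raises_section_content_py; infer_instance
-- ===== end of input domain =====

-- B replaces A's single stateful scan (flags, break) by an index-based formulation:
-- precomputed per-line arrays, filtered index ranges for the header and the boundary,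
-- and a slice of the stripped lines (objective: alternative decomposition, same cost).

-- ===== PORT A =====
-- A's loop, step for step: state = (content, in_raises, skip_next, raises_indent);
-- the Python lookahead lines[idx+1] is the head of the remaining list.
def pvALoop : List (List Char) → List (List Char) → Bool → Bool → Nat → (List (List Char) × Bool)
  | [], content, inR, _, _ => (content, inR)
  | line :: rest, content, inR, skip, rInd =>
    if skip then pvALoop rest content inR false rInd
    else
      let stripped := PySem.Chars.strip line
      let indent := line.length - (PySem.Chars.lstrip line).length
      if inR = false then
        if stripped = "Raises:".toList then pvALoop rest content true false indent
        else if stripped = "Raises".toList ∧ rest ≠ [] then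
          let nxt := PySem.Chars.strip (rest.headD [])
          if !nxt.isEmpty && nxt.all (· == '-') then pvALoop rest content true true indent
          else pvALoop rest content inR false rInd
        else pvALoop rest content inR false rInd
      else
        if !stripped.isEmpty && decide (indent ≤ rInd) then
          let nxt := PySem.Chars.strip (rest.headD [])
          if PySem.Chars.endswith stripped [':'] || (!nxt.isEmpty && nxt.all (· == '-')) then
            (content, inR)  -- break
          else pvALoop rest (content ++ [stripped]) inR false rInd
        else pvALoop rest (content ++ [stripped]) inR false rInd

def raises_section_content_py (docstring : String) : Option String :=
  match pvALoop (PySem.Chars.splitlines docstring.toList) [] false false 0 with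
  | (content, inR) =>
    if inR then some (String.ofList (PySem.Chars.join ['\n'] content)) else none

-- ===== PORT B =====
-- B's all-dashes test: bool(s) and s == "-" * len(s)
def pvDashB (s : List Char) : Bool := !s.isEmpty && (s == List.replicate s.length '-')

-- header-candidate predicate of B's first comprehension (on line index i)
def pvHdrP (stripped : List (List Char)) (dashed : List Bool) (n i : Nat) : Bool :=
  (stripped.getD i [] == "Raises:".toList) ||
  ((stripped.getD i [] == "Raises".toList) && decide (i + 1 < n) && dashed.getD (i + 1) false)

-- boundary predicate of B's second comprehension (on line index j)
def pvStopP (stripped : List (List Char)) (indents : List Nat) (dashed : List Bool)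
    (n hind j : Nat) : Bool :=
  (!(stripped.getD j []).isEmpty) && decide (indents.getD j 0 ≤ hind) &&
  (PySem.Chars.endswith (stripped.getD j []) [':'] || (decide (j + 1 < n) && dashed.getD (j + 1) false))

def raises_section_content_py_alt (docstring : String) : Option String :=
  let lines := PySem.Chars.splitlines docstring.toList
  let stripped := lines.map PySem.Chars.strip
  let indents := lines.map (fun l => l.length - (PySem.Chars.lstrip l).length)
  let n := lines.length
  let dashed := stripped.map pvDashB
  let headers := (List.range n).filter (pvHdrP stripped dashed n)
  match headers.head? with
  | none => none
  | some h =>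
    let start := if stripped.getD h [] == "Raises:".toList then h + 1 else h + 2
    let hind := indents.getD h 0
    let stops := (List.range' start (n - start)).filter (pvStopP stripped indents dashed n hind)
    let e := stops.head?.getD n
    -- stripped[start:e] as drop/take (exact: 0 ≤ start ≤ e ≤ n here)
    some (String.ofList (PySem.Chars.join ['\n'] ((stripped.drop start).take (e - start))))

-- ===== PRECONDITION & SPEC =====
def Spec_raises_section_content_py (docstring : String) (out : Option String) : Prop := out = raises_section_content_py_alt docstring
instance (docstring : String) (out : Option String) : Decidable (Spec_raises_section_content_py docstring out) := by unfold Spec_raises_section_content_py; infer_instance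

-- ===== CLAIM (what is proved, stated in full; the proofs are below) =====
def Claim_equal_raises_section_content_py : Prop := ∀ (docstring : String), Dom_raises_section_content_py docstring → Spec_raises_section_content_py docstring (raises_section_content_py docstring)

-- ===== LEMMAS AND PROOFS =====

-- proof-side recursive middle forms (used only in the proofs below)
def pvFindHeader : List (List Char) → Option (List (List Char) × Nat)
  | [] => none
  | line :: rest =>
    let s := PySem.Chars.strip line
    if s = "Raises:".toList then
      some (rest, line.length - (PySem.Chars.lstrip line).length)
    else if s = "Raises".toList ∧ rest ≠ [] ∧ pvDashB (PySem.Chars.strip (rest.headD [])) = true then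
      some (rest.tail, line.length - (PySem.Chars.lstrip line).length)
    else pvFindHeader rest

def pvCollect (hInd : Nat) : List (List Char) → List (List Char)
  | [] => []
  | line :: rest =>
    let s := PySem.Chars.strip line
    if s ≠ [] ∧ line.length - (PySem.Chars.lstrip line).length ≤ hInd ∧
        (PySem.Chars.endswith s [':'] = true ∨ pvDashB (PySem.Chars.strip (rest.headD [])) = true) then
      []
    else s :: pvCollect hInd rest

theorem pvAllDash_eq (nxt : List Char) : nxt.all (· == '-') = (nxt == List.replicate nxt.length '-') := by
  induction nxt with
  | nil => rfl
  | cons c cs ih => simp only [List.all_cons, List.length_cons, List.replicate_succ, List.cons_beq_cons, ih]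

set_option maxRecDepth 8000 in
theorem pvCollect_eq (ls : List (List Char)) (content : List (List Char)) (hInd : Nat) :
    pvALoop ls content true false hInd = (content ++ pvCollect hInd ls, true) := by
  induction ls generalizing content with
  | nil => simp [pvALoop, pvCollect]
  | cons line rest ih =>
    simp only [pvALoop, pvCollect, pvDashB, pvAllDash_eq, Bool.and_eq_true, Bool.or_eq_true,
      Bool.not_eq_true', List.isEmpty_eq_false_iff, decide_eq_true_eq, beq_iff_eq,
      Bool.false_eq_true, Bool.true_eq_false, if_false, reduceIte]
    split_ifs <;> first | rfl | tauto | simp [ih]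

set_option maxRecDepth 8000 in
theorem pvFind_eq (ls : List (List Char)) (r : Nat) :
    pvALoop ls [] false false r =
      match pvFindHeader ls with
      | none => ([], false)
      | some (body, ind) => (pvCollect ind body, true) := by
  induction ls generalizing r with
  | nil => simp [pvALoop, pvFindHeader]
  | cons line rest ih =>
    simp only [pvALoop, pvFindHeader, pvDashB, pvAllDash_eq, Bool.and_eq_true, Bool.or_eq_true,
      Bool.not_eq_true', List.isEmpty_eq_false_iff, decide_eq_true_eq, beq_iff_eq,
      Bool.false_eq_true, Bool.true_eq_false, if_false, reduceIte]
    split_ifs <;> try first | rfl | tauto | simp [ih, pvCollect_eq]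
    obtain ⟨-, hne⟩ := ‹PySem.Chars.strip line = "Raises".toList ∧ rest ≠ []›
    cases rest with
    | nil => exact absurd rfl hne
    | cons l2 rest2 => simp [pvALoop, pvCollect_eq]

-- getD commutes with map when the default is preserved
theorem pvGetD_map {α β : Type} (f : α → β) (d : α) (d' : β) (h : f d = d') (L : List α)
    (i : Nat) : (L.map f).getD i d' = f (L.getD i d) := by
  subst h
  induction L generalizing i with
  | nil => cases i <;> rfl
  | cons a t ih => cases i with
    | zero => rfl
    | succ j => simpa using ih j

theorem pvHdrP_shift (s₀ : List Char) (S : List (List Char)) (d₀ : Bool) (D : List Bool)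
    (n i : Nat) : pvHdrP (s₀ :: S) (d₀ :: D) (n + 1) (i + 1) = pvHdrP S D n i := by
  simp [pvHdrP, Nat.succ_lt_succ_iff]

-- header search: B's filtered range agrees with the recursive pvFindHeader
set_option maxRecDepth 8000 in
theorem pvHdr_eq (L : List (List Char)) :
    (match ((List.range L.length).filter
        (pvHdrP (L.map PySem.Chars.strip) ((L.map PySem.Chars.strip).map pvDashB) L.length)).head? with
     | none => (none : Option (List (List Char) × Nat))
     | some h =>
        some (L.drop (if (L.map PySem.Chars.strip).getD h [] == "Raises:".toList then h + 1 else h + 2),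
              (L.map (fun l => l.length - (PySem.Chars.lstrip l).length)).getD h 0))
    = pvFindHeader L := by
  induction L with
  | nil => rfl
  | cons line rest ih =>
    rw [List.length_cons, List.range_succ_eq_map, List.map_cons, List.map_cons]
    rw [show List.filter (pvHdrP (PySem.Chars.strip line :: rest.map PySem.Chars.strip)
          (pvDashB (PySem.Chars.strip line) :: (rest.map PySem.Chars.strip).map pvDashB)
          (rest.length + 1)) (0 :: (List.range rest.length).map Nat.succ)
        = (if pvHdrP (PySem.Chars.strip line :: rest.map PySem.Chars.strip)
              (pvDashB (PySem.Chars.strip line) :: (rest.map PySem.Chars.strip).map pvDashB)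
              (rest.length + 1) 0 then [0] else []) ++
          ((List.range rest.length).filter
            (pvHdrP (rest.map PySem.Chars.strip) ((rest.map PySem.Chars.strip).map pvDashB)
              rest.length)).map Nat.succ from by
      rw [List.filter_cons, List.filter_map]
      rw [show (pvHdrP (PySem.Chars.strip line :: rest.map PySem.Chars.strip)
            (pvDashB (PySem.Chars.strip line) :: (rest.map PySem.Chars.strip).map pvDashB)
            (rest.length + 1)) ∘ Nat.succ
          = pvHdrP (rest.map PySem.Chars.strip) ((rest.map PySem.Chars.strip).map pvDashB)
              rest.length from by
        funext i; simpa [Function.comp] using pvHdrP_shift _ _ _ _ rest.length i]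
      split <;> simp]
    by_cases h0 : pvHdrP (PySem.Chars.strip line :: rest.map PySem.Chars.strip)
        (pvDashB (PySem.Chars.strip line) :: (rest.map PySem.Chars.strip).map pvDashB)
        (rest.length + 1) 0 = true
    · -- header at the first line
      rw [if_pos h0]
      simp only [pvHdrP, List.getD_cons_zero, List.getD_cons_succ, Bool.or_eq_true,
        Bool.and_eq_true, beq_iff_eq, decide_eq_true_eq] at h0
      simp only [List.cons_append, List.head?_cons, pvFindHeader]
      rcases h0 with hg | ⟨⟨hn, hlt⟩, hd⟩
      · simp [hg, List.getD_cons_zero]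
      · cases rest with
        | nil => simp at hlt
        | cons r2 t2 =>
          simp only [List.map_cons, List.getD_cons_succ, List.getD_cons_zero] at hd
          by_cases hg2 : PySem.Chars.strip line = "Raises:".toList
          · simp [hg2]
          · simp [hg2, hn, hd, List.headD]
    · rw [if_neg h0]
      simp only [List.nil_append, List.head?_map]
      have hrec : pvFindHeader (line :: rest) = pvFindHeader rest := by
        simp only [pvHdrP, List.getD_cons_zero, List.getD_cons_succ, Bool.or_eq_true,
          Bool.and_eq_true, beq_iff_eq, decide_eq_true_eq, not_or, not_and] at h0
        push_neg at h0
        obtain ⟨hg, h2⟩ := h0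
        simp only [pvFindHeader, if_neg hg]
        rw [if_neg]
        rintro ⟨hn, hne, hd⟩
        cases rest with
        | nil => exact hne rfl
        | cons r2 t2 =>
          exact absurd hd (by simpa [List.headD, List.getD_cons_zero] using h2 ⟨hn, by simp⟩)
      rw [hrec, ← ih]
      cases hh : ((List.range rest.length).filter
          (pvHdrP (rest.map PySem.Chars.strip) ((rest.map PySem.Chars.strip).map pvDashB)
            rest.length)).head? with
      | none => rfl
      | some h' =>
        simp only [Option.map_some, List.map_cons, List.getD_cons_succ]
        by_cases hc : ((rest.map PySem.Chars.strip).getD h' [] == "Raises:".toList) = true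
        · rw [if_pos hc, if_pos hc, show h' + 1 + 1 = (h' + 1) + 1 from rfl, List.drop_succ_cons]
        · rw [if_neg hc, if_neg hc, show h' + 2 + 1 = (h' + 2) + 1 from rfl, List.drop_succ_cons]

-- the boundary stop condition at an in-range index equals pvCollect's head condition
theorem pvStop_cond (L : List (List Char)) (hind start : Nat) (hs : start < L.length) :
    pvStopP (L.map PySem.Chars.strip) (L.map (fun l => l.length - (PySem.Chars.lstrip l).length))
        ((L.map PySem.Chars.strip).map pvDashB) L.length hind start = true ↔
    (PySem.Chars.strip (L.getD start []) ≠ [] ∧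
      (L.getD start []).length - (PySem.Chars.lstrip (L.getD start [])).length ≤ hind ∧
      (PySem.Chars.endswith (PySem.Chars.strip (L.getD start [])) [':'] = true ∨
        pvDashB (PySem.Chars.strip ((L.drop (start + 1)).headD [])) = true)) := by
  have hS : (L.map PySem.Chars.strip).getD start [] = PySem.Chars.strip (L.getD start []) :=
    pvGetD_map PySem.Chars.strip [] [] (by decide) L start
  have hI : (L.map (fun l => l.length - (PySem.Chars.lstrip l).length)).getD start 0
      = (L.getD start []).length - (PySem.Chars.lstrip (L.getD start [])).length :=
    pvGetD_map _ [] 0 (by decide) L start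
  have hD : ((L.map PySem.Chars.strip).map pvDashB).getD (start + 1) false
      = pvDashB (PySem.Chars.strip (L.getD (start + 1) [])) := by
    rw [List.map_map]
    exact pvGetD_map (pvDashB ∘ PySem.Chars.strip) [] false (by decide) L (start + 1)
  have hlook : (decide (start + 1 < L.length) &&
      ((L.map PySem.Chars.strip).map pvDashB).getD (start + 1) false)
      = pvDashB (PySem.Chars.strip ((L.drop (start + 1)).headD [])) := by
    by_cases hlt : start + 1 < L.length
    · rw [hD]
      have : (L.drop (start + 1)).headD [] = L.getD (start + 1) [] := by
        rw [List.drop_eq_getElem_cons hlt]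
        simp [List.getD_eq_getElem?_getD, List.getElem?_eq_getElem hlt]
      simp [hlt, this]
    · have hnil : L.drop (start + 1) = [] := List.drop_eq_nil_of_le (by omega)
      simp [hlt, hnil, List.headD, pvDashB]
      intro h
      exact absurd (by decide) h
  rw [pvStopP, hS, hI, hlook]
  simp [and_assoc]

-- body collection: B's slice up to the first boundary equals the recursive pvCollect
theorem pvColl_eq (k : Nat) : ∀ (L : List (List Char)) (hind start : Nat),
    L.length = start + k →
    ((L.map PySem.Chars.strip).drop start).take
        ((((List.range' start k).filter
            (pvStopP (L.map PySem.Chars.strip)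
              (L.map (fun l => l.length - (PySem.Chars.lstrip l).length))
              ((L.map PySem.Chars.strip).map pvDashB) L.length hind)).head?).getD L.length - start)
      = pvCollect hind (L.drop start) := by
  induction k with
  | zero =>
    intro L hind start hlen
    have hnil : L.drop start = [] := List.drop_eq_nil_of_le (by omega)
    have hnilS : (L.map PySem.Chars.strip).drop start = [] :=
      List.drop_eq_nil_of_le (by simp; omega)
    simp [hnil, hnilS, pvCollect]
  | succ k ih =>
    intro L hind start hlen
    have hs : start < L.length := by omega
    have hgd : L.getD start [] = L[start] := by
      simp [List.getD_eq_getElem?_getD, List.getElem?_eq_getElem hs]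
    have hdropS : (L.map PySem.Chars.strip).drop start
        = PySem.Chars.strip L[start] :: (L.map PySem.Chars.strip).drop (start + 1) := by
      rw [List.drop_eq_getElem_cons (by simp [hs])]
      simp
    have hdropL : L.drop start = L[start] :: L.drop (start + 1) := List.drop_eq_getElem_cons hs
    rw [List.range'_succ, List.filter_cons]
    by_cases hq : pvStopP (L.map PySem.Chars.strip)
        (L.map (fun l => l.length - (PySem.Chars.lstrip l).length))
        ((L.map PySem.Chars.strip).map pvDashB) L.length hind start = true
    · -- boundary right here: empty slice, pvCollect stops
      rw [if_pos hq]
      have hcond := (pvStop_cond L hind start hs).mp hq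
      rw [hdropL, pvCollect]
      rw [if_pos (by rw [hgd] at hcond; exact hcond)]
      simp
    · rw [if_neg hq]
      have hcond := mt (pvStop_cond L hind start hs).mpr (by simpa using hq)
      have hge : start + 1 ≤ (((List.range' (start + 1) k).filter
          (pvStopP (L.map PySem.Chars.strip)
            (L.map (fun l => l.length - (PySem.Chars.lstrip l).length))
            ((L.map PySem.Chars.strip).map pvDashB) L.length hind)).head?).getD L.length := by
        cases hh : (((List.range' (start + 1) k).filter
            (pvStopP (L.map PySem.Chars.strip)
              (L.map (fun l => l.length - (PySem.Chars.lstrip l).length))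
              ((L.map PySem.Chars.strip).map pvDashB) L.length hind))).head? with
        | none => simp; omega
        | some j =>
          have hmem : j ∈ (List.range' (start + 1) k).filter
              (pvStopP (L.map PySem.Chars.strip)
                (L.map (fun l => l.length - (PySem.Chars.lstrip l).length))
                ((L.map PySem.Chars.strip).map pvDashB) L.length hind) :=
            List.mem_of_mem_head? (by rw [hh]; rfl)
          have := (List.mem_range'_1.mp (List.mem_of_mem_filter hmem)).1
          exact this
      rw [hdropS, hdropL, pvCollect]
      rw [if_neg (by rw [hgd] at hcond; exact hcond)]
      have htake : ∀ (e : Nat), start + 1 ≤ e →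
          (PySem.Chars.strip L[start] :: (L.map PySem.Chars.strip).drop (start + 1)).take (e - start)
          = PySem.Chars.strip L[start] :: ((L.map PySem.Chars.strip).drop (start + 1)).take (e - (start + 1)) := by
        intro e he
        have : e - start = (e - (start + 1)) + 1 := by omega
        rw [this, List.take_succ_cons]
      rw [htake _ hge, ih L hind (start + 1) (by omega)]
-- ===== VERDICT (by name: the statement is the Claim_ definition above) =====
theorem raises_section_content_py_spec : Claim_equal_raises_section_content_py := by
  intro docstring _
  unfold Spec_raises_section_content_py raises_section_content_py raises_section_content_py_alt
  dsimp only
  rw [pvFind_eq, ← pvHdr_eq]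
  set L := PySem.Chars.splitlines docstring.toList with hL
  cases hh : ((List.range L.length).filter
      (pvHdrP (L.map PySem.Chars.strip) ((L.map PySem.Chars.strip).map pvDashB) L.length)).head? with
  | none => rfl
  | some h =>
    have hmem : h ∈ (List.range L.length).filter
        (pvHdrP (L.map PySem.Chars.strip) ((L.map PySem.Chars.strip).map pvDashB) L.length) :=
      List.mem_of_mem_head? (by rw [hh]; rfl)
    have hhd : pvHdrP (L.map PySem.Chars.strip) ((L.map PySem.Chars.strip).map pvDashB) L.length h = true :=
      List.of_mem_filter hmem
    have hlt : h < L.length := List.mem_range.mp (List.mem_of_mem_filter hmem)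
    have hstart : (if ((L.map PySem.Chars.strip).getD h [] == "Raises:".toList) = true then h + 1 else h + 2) ≤ L.length := by
      by_cases hc : ((L.map PySem.Chars.strip).getD h [] == "Raises:".toList) = true
      · rw [if_pos hc]; omega
      · rw [if_neg hc]
        simp only [pvHdrP, Bool.or_eq_true, Bool.and_eq_true, decide_eq_true_eq] at hhd
        rcases hhd with hg | ⟨⟨_, h2⟩, _⟩
        · exact absurd hg hc
        · omega
    dsimp only
    rw [← pvColl_eq (L.length - (if ((L.map PySem.Chars.strip).getD h [] == "Raises:".toList) = true then h + 1 else h + 2)) L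
        ((L.map (fun l => l.length - (PySem.Chars.lstrip l).length)).getD h 0)
        (if ((L.map PySem.Chars.strip).getD h [] == "Raises:".toList) = true then h + 1 else h + 2)
        (by omega)]
    rfl
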